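-- pv_equiv track=rewrite | github.com/sun1279/pythontest | domain.py | IsGood5
-- ===== SOURCE A (Python) =====
-- def IsGood5(a):
--     cnt = 0
--     tmp = 99
--     for i in range(len(a)):
--         if tmp==int(a[i]):
--             cnt+=1
--         else:
--             if cnt is 2:
--                 cnt=1
--                 if tmp is (int(a[i])-1):
--                     tmp = int(a[i])
--                 else:
--                     return False
--             elif cnt is 0:
--                 cnt=1
--                 tmp = int(a[i])
--             else:
--                 return False
--
--     return True
-- ===== SOURCE B (Python) =====
-- def IsGood5(a):
--     # Phase 1: run-length encode the list into (value, length) runs.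
--     runs = []
--     run_len = 0
--     prev = 0
--     for x in a:
--         if run_len and x == prev:
--             run_len += 1
--         else:
--             if run_len:
--                 runs.append((prev, run_len))
--             prev, run_len = x, 1
--     if run_len:
--         runs.append((prev, run_len))
--     # Phase 2: every run except the last must have length 2 and be followed
--     # by the successor value; the last run may have any length.
--     for (v, l), (w, _) in zip(runs, runs[1:]):
--         if l != 2 or w != v + 1:
--             return False
--     return True
-- ===== Notes on version B (the rewrite author's own statement) =====
-- stated objective: alternative
-- what changed: A is a single-pass state machine tracking (count, current value) with early returns; B first run-length encodes the list into (value, length) runs and then checks each adjacent run pair (non-last runs have length 2 and successor values).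
-- intended difference: On valid staircase inputs (all non-last runs of length exactly 2 and consecutive run values increasing by 1) where some non-first run's value minus 1 lies outside CPython's small-int cache -5..256, A returns False because it compares ints with 'is', while B returns True, the intended answer for a valid pattern. — e.g. on IsGood5([300, 300, 301]): A returns false, B returns true
import Mathlib
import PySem

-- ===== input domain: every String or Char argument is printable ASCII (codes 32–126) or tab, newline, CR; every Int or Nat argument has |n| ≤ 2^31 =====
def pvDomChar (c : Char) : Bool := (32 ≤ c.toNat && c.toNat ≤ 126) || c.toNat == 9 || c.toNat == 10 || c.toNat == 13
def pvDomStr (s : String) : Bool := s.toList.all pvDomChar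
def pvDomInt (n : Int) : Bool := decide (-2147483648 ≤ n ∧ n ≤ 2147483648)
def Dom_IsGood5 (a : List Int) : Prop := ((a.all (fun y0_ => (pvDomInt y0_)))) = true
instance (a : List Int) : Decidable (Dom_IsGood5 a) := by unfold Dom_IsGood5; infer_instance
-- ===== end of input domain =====

-- ===== PORT A =====
-- B re-implements A as run-length encoding + adjacent-pair check instead of A's
-- single-pass state machine; A's int 'is' comparison makes it wrongly reject valid
-- staircases whose transition values fall outside CPython's small-int cache (see D_).
-- `tmp is (int(a[i])-1)` ported as: equal AND the fresh value x-1 lies in CPython's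
-- small-int cache -5..256 (outside it the freshly computed x-1 is a distinct object).
def goA : List Int → Int → Int → Bool
  | [], _, _ => true
  | x :: xs, cnt, tmp =>
    if tmp = x then goA xs (cnt + 1) tmp
    else if cnt = 2 then
      if tmp = x - 1 ∧ -5 ≤ x - 1 ∧ x - 1 ≤ 256 then goA xs 1 x else false
    else if cnt = 0 then goA xs 1 x
    else false

def IsGood5 (a : List Int) : Bool := goA a 0 99

-- ===== PORT B =====
-- phase 1 of Source B: one fold building the runs list (runs, prev, run_len)
def stepB (st : List (Int × Int) × Int × Int) (x : Int) : List (Int × Int) × Int × Int :=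
  let (runs, prev, runLen) := st
  if runLen ≠ 0 ∧ x = prev then (runs, prev, runLen + 1)
  else ((if runLen ≠ 0 then runs ++ [(prev, runLen)] else runs), x, 1)

-- phase 2 of Source B: the zip(runs, runs[1:]) loop over adjacent run pairs
def chkB : List (Int × Int) → Bool
  | (v, l) :: (w, m) :: rest =>
    if l ≠ 2 ∨ w ≠ v + 1 then false else chkB ((w, m) :: rest)
  | _ => true

def IsGood5_alt (a : List Int) : Bool :=
  let st := a.foldl stepB ([], 0, 0)
  let runs := if st.2.2 ≠ 0 then st.1 ++ [(st.2.1, st.2.2)] else st.1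
  chkB runs

-- ===== PRECONDITION & SPEC =====
-- On valid staircase inputs (all non-last runs of length exactly 2, consecutive run
-- values increasing by 1) where some non-first run's value minus 1 lies outside
-- CPython's small-int cache -5..256, A returns False (its `is` comparison of ints
-- fails on distinct objects) while B returns True, the intended answer.
-- (a.destutter Ne is the list of run values; a.count v is run v's length since
-- run values are distinct along a staircase.)
def D_IsGood5 (a : List Int) : Prop :=
  let vs := a.destutter Ne
  List.IsChain (fun x y => y = x + 1) vs ∧
  (∀ v ∈ vs.dropLast, a.count v = 2) ∧ ∃ v ∈ vs.dropLast, 256 < v ∨ v < -5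

instance (a : List Int) : Decidable (D_IsGood5 a) := by unfold D_IsGood5; infer_instance

def Spec_IsGood5 (a : List Int) (out : Bool) : Prop := ¬ D_IsGood5 a → out = IsGood5_alt a
instance (a : List Int) (out : Bool) : Decidable (Spec_IsGood5 a out) := by
  unfold Spec_IsGood5; infer_instance

def pvDiffWitness_IsGood5 : List Int := [300, 300, 301]
def pvDiffWitnessOut_IsGood5 : Bool × Bool := (false, true)

-- ===== CLAIM (what is proved, stated in full; the proofs are below) =====
def Claim_unchanged_IsGood5 : Prop := ∀ (a : List Int), Dom_IsGood5 a → Spec_IsGood5 a (IsGood5 a)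
def Claim_changed_IsGood5 : Prop :=
  Dom_IsGood5 (pvDiffWitness_IsGood5) ∧ D_IsGood5 (pvDiffWitness_IsGood5) ∧
  IsGood5 (pvDiffWitness_IsGood5) = pvDiffWitnessOut_IsGood5.1 ∧
  IsGood5_alt (pvDiffWitness_IsGood5) = pvDiffWitnessOut_IsGood5.2 ∧
  pvDiffWitnessOut_IsGood5.1 ≠ pvDiffWitnessOut_IsGood5.2
def Claim_exact_IsGood5 : Prop := ∀ (a : List Int), Dom_IsGood5 a → D_IsGood5 a → IsGood5 a ≠ IsGood5_alt a

-- ===== LEMMAS AND PROOFS =====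

-- run-length encoding of a list, the common currency of both ports' proofs
def runsF (v k : Int) : List Int → List (Int × Int)
  | [] => [(v, k)]
  | x :: xs => if x = v then runsF v (k + 1) xs else (v, k) :: runsF x 1 xs

def runsD : List Int → List (Int × Int)
  | [] => []
  | x :: xs => runsF x 1 xs

-- A's checking loop, phrased on the runs list: adjacent-pair check plus the cache condition
def chkA : List (Int × Int) → Bool
  | (v, l) :: (w, m) :: rest =>
    if l = 2 ∧ v = w - 1 ∧ -5 ≤ w - 1 ∧ w - 1 ≤ 256 then chkA ((w, m) :: rest) else false
  | _ => true

theorem runsF_head (x k : Int) (l : List Int) :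
    ∃ m rest, runsF x k l = (x, m) :: rest := by
  induction l generalizing k with
  | nil => exact ⟨k, [], rfl⟩
  | cons y ys ih =>
    by_cases h : y = x
    · simpa [runsF, h] using ih (k + 1)
    · exact ⟨k, runsF y 1 ys, by simp [runsF, h]⟩

theorem goA_runs (l : List Int) (v k : Int) (hk : 1 ≤ k) :
    goA l k v = chkA (runsF v k l) := by
  induction l generalizing v k with
  | nil => simp [goA, runsF, chkA]
  | cons x xs ih =>
    by_cases h : x = v
    · subst h
      simpa [goA, runsF] using ih x (k + 1) (by omega)
    · obtain ⟨m, rest, hr⟩ := runsF_head x 1 xs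
      have hvx : v ≠ x := fun hvx => h hvx.symm
      have hrw : runsF v k (x :: xs) = (v, k) :: (x, m) :: rest := by
        simp [runsF, h, hr]
      have hcA : chkA ((v, k) :: (x, m) :: rest) =
          if k = 2 ∧ v = x - 1 ∧ -5 ≤ x - 1 ∧ x - 1 ≤ 256 then chkA ((x, m) :: rest) else false := by
        simp [chkA]
      have hIH : chkA ((x, m) :: rest) = goA xs 1 x := by
        rw [← hr, ← ih x 1 (by omega)]
      rw [hrw, hcA, hIH]
      by_cases h2 : k = 2
      · subst h2
        by_cases hc : v = x - 1 ∧ -5 ≤ x - 1 ∧ x - 1 ≤ 256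
        · simp [goA, hvx, hc]
        · simp [goA, hvx, hc]
      · have h0 : k ≠ 0 := by omega
        simp [goA, hvx, h2, h0]

-- phase 1 of Source B, started in a live run (run_len = k ≥ 1), produces acc ++ runsF v k l
theorem foldB_runs (l : List Int) (acc : List (Int × Int)) (v k : Int) (hk : 1 ≤ k) :
    (if (l.foldl stepB (acc, v, k)).2.2 ≠ 0
      then (l.foldl stepB (acc, v, k)).1 ++
        [((l.foldl stepB (acc, v, k)).2.1, (l.foldl stepB (acc, v, k)).2.2)]
      else (l.foldl stepB (acc, v, k)).1) = acc ++ runsF v k l := by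
  induction l generalizing acc v k with
  | nil => simp [runsF]; omega
  | cons x xs ih =>
    have hk0 : k ≠ 0 := by omega
    by_cases h : x = v
    · have hst : stepB (acc, v, k) x = (acc, v, k + 1) := by simp [stepB, hk0, h]
      rw [List.foldl_cons, hst, ih acc v (k + 1) (by omega)]
      simp [runsF, h]
    · have hst : stepB (acc, v, k) x = (acc ++ [(v, k)], x, 1) := by
        simp [stepB, hk0, h]
      rw [List.foldl_cons, hst, ih (acc ++ [(v, k)]) x 1 le_rfl]
      simp [runsF, h]

theorem altB_runs (a : List Int) : IsGood5_alt a = chkB (runsD a) := by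
  cases a with
  | nil => simp [IsGood5_alt, runsD, chkB]
  | cons x xs =>
    have h1 : stepB ([], 0, 0) x = ([], x, 1) := by simp [stepB]
    simp only [IsGood5_alt, List.foldl_cons, h1, runsD]
    exact congrArg chkB (foldB_runs xs [] x 1 le_rfl)

theorem aA_runs (a : List Int) : IsGood5 a = chkA (runsD a) := by
  cases a with
  | nil => simp [IsGood5, goA, runsD, chkA]
  | cons x xs =>
    have h : goA (x :: xs) 0 99 = goA xs 1 x := by
      by_cases hx : (99 : Int) = x
      · simp [goA, hx]
      · simp [goA, hx]
    simp only [IsGood5, h, runsD]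
    exact goA_runs xs x 1 le_rfl

theorem chkB_chain (rs : List (Int × Int)) :
    chkB rs = decide (List.IsChain (fun p q : Int × Int => p.2 = 2 ∧ q.1 = p.1 + 1) rs) := by
  induction rs with
  | nil => simp [chkB]
  | cons p tl ih =>
    cases tl with
    | nil => simp [chkB]
    | cons q tl' =>
      obtain ⟨v, l⟩ := p
      obtain ⟨w, m⟩ := q
      rw [chkB.eq_def]
      simp only [ih, List.isChain_cons_cons]
      by_cases h : l ≠ 2 ∨ w ≠ v + 1
      · have h' : ¬ (l = 2 ∧ w = v + 1) := by tauto
        simp [h, h']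
      · push_neg at h
        simp [h.1, h.2]

theorem chkA_split (rs : List (Int × Int)) :
    chkA rs = (chkB rs &&
      decide (List.IsChain (fun _ q : Int × Int => -5 ≤ q.1 - 1 ∧ q.1 - 1 ≤ 256) rs)) := by
  induction rs with
  | nil => simp [chkA, chkB]
  | cons p tl ih =>
    cases tl with
    | nil => simp [chkA, chkB]
    | cons q tl' =>
      obtain ⟨v, l⟩ := p
      obtain ⟨w, m⟩ := q
      rw [chkA.eq_def, chkB.eq_def]
      simp only [ih, List.isChain_cons_cons]
      by_cases hg : l = 2 ∧ w = v + 1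
      · have hb : ¬ (l ≠ 2 ∨ w ≠ v + 1) := by tauto
        by_cases hc : -5 ≤ w - 1 ∧ w - 1 ≤ 256
        · have ha : l = 2 ∧ v = w - 1 ∧ -5 ≤ w - 1 ∧ w - 1 ≤ 256 := ⟨hg.1, by omega, hc.1, hc.2⟩
          rw [if_pos ha, if_neg hb]
          have h1 : ((-5:Int) < w) = True := by simp; omega
          have h2 : (w ≤ (257:Int)) = True := by simp; omega
          have h3 : ((-5:Int) ≤ v) = True := by simp; omega
          have h4 : (v ≤ (256:Int)) = True := by simp; omega
          simp [hg.1, hg.2, h1, h2, h3, h4]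
        · have ha : ¬ (l = 2 ∧ v = w - 1 ∧ -5 ≤ w - 1 ∧ w - 1 ≤ 256) := by tauto
          rw [if_neg ha, if_neg hb]
          by_cases hw : (-5:Int) < w
          · have h2 : ¬ (w ≤ (257:Int)) := by omega
            simp [h2]
          · simp [hw]
      · have ha : ¬ (l = 2 ∧ v = w - 1 ∧ -5 ≤ w - 1 ∧ w - 1 ≤ 256) := by
          rintro ⟨h2, h3, _⟩; exact hg ⟨h2, by omega⟩
        have hb : l ≠ 2 ∨ w ≠ v + 1 := by tauto
        rw [if_neg ha, if_pos hb]
        by_cases hl : l = 2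
        · have hw : w ≠ v + 1 := by tauto
          simp [hw]
        · simp [hl]

-- the run values of runsF are the (consecutive-)deduplicated list
theorem mapfst_runsF (l : List Int) (v k : Int) :
    (runsF v k l).map Prod.fst = List.destutter' Ne v l := by
  induction l generalizing v k with
  | nil => simp [runsF]
  | cons x xs ih =>
    by_cases h : x = v
    · subst h
      simp [runsF, List.destutter'_cons, ih]
    · simp [runsF, h, List.destutter'_cons, ih, Ne.symm h]

theorem mem_mapfst_runsF (l : List Int) (v k : Int) :
    ∀ y, (y ∈ l ∨ y = v) → y ∈ (runsF v k l).map Prod.fst := by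
  induction l generalizing v k with
  | nil =>
    rintro y (h | rfl)
    · cases h
    · simp [runsF]
  | cons x xs ih =>
    by_cases h : x = v
    · rw [show runsF v k (x :: xs) = runsF v (k + 1) xs from by simp [runsF, h]]
      rintro y (hy | rfl)
      · rcases List.mem_cons.mp hy with rfl | hy'
        · exact ih v (k + 1) y (Or.inr h)
        · exact ih v (k + 1) y (Or.inl hy')
      · exact ih _ (k + 1) _ (Or.inr rfl)
    · rw [show runsF v k (x :: xs) = (v, k) :: runsF x 1 xs from by simp [runsF, h],
        List.map_cons]
      rintro y (hy | rfl)
      · rcases List.mem_cons.mp hy with rfl | hy'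
        · exact List.mem_cons_of_mem _ (ih y 1 y (Or.inr rfl))
        · exact List.mem_cons_of_mem _ (ih x 1 y (Or.inl hy'))
      · exact List.mem_cons_self

theorem count_runsF (l : List Int) (v k : Int)
    (hnd : ((runsF v k l).map Prod.fst).Nodup) :
    ∀ p ∈ runsF v k l, p.2 = (if p.1 = v then k else 0) + (l.count p.1 : Int) := by
  induction l generalizing v k with
  | nil =>
    intro p hp
    simp [runsF] at hp
    subst hp
    simp
  | cons x xs ih =>
    by_cases h : x = v
    · subst h
      intro p hp
      have hp' : p ∈ runsF x (k + 1) xs := by simpa [runsF] using hp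
      have := ih x (k + 1) (by simpa [runsF] using hnd) p hp'
      by_cases hpx : p.1 = x
      · simp [hpx, List.count_cons] at this ⊢
        omega
      · simpa [hpx, List.count_cons, Ne.symm hpx] using this
    · intro p hp
      have hrw : runsF v k (x :: xs) = (v, k) :: runsF x 1 xs := by simp [runsF, h]
      rw [hrw] at hp
      have hnd' : v ∉ (runsF x 1 xs).map Prod.fst ∧ ((runsF x 1 xs).map Prod.fst).Nodup := by
        rw [hrw] at hnd
        simpa [List.nodup_cons] using hnd
      rcases List.mem_cons.mp hp with rfl | hp'
      · have hv : v ∉ x :: xs := by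
          intro hv
          rcases List.mem_cons.mp hv with rfl | hv'
          · exact hnd'.1 (mem_mapfst_runsF xs v 1 v (Or.inr rfl))
          · exact hnd'.1 (mem_mapfst_runsF xs x 1 v (Or.inl hv'))
        simp [List.count_eq_zero.mpr hv]
      · have hne : p.1 ≠ v := by
          intro hpv
          exact hnd'.1 (hpv ▸ List.mem_map_of_mem hp')
        have := ih x 1 hnd'.2 p hp'
        by_cases hpx : p.1 = x
        · simp [hpx, List.count_cons] at this ⊢
          omega
        · simpa [hpx, hne, List.count_cons, Ne.symm hpx] using this

theorem chainGood_iff (rs : List (Int × Int)) :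
    List.IsChain (fun p q : Int × Int => p.2 = 2 ∧ q.1 = p.1 + 1) rs ↔
      (List.IsChain (fun x y : Int => y = x + 1) (rs.map Prod.fst) ∧
       ∀ p ∈ rs.dropLast, p.2 = 2) := by
  induction rs with
  | nil => simp
  | cons p tl ih =>
    cases tl with
    | nil => simp
    | cons q tl' =>
      simp only [List.map_cons] at ih
      simp only [List.map_cons, List.isChain_cons_cons, List.dropLast_cons₂, List.mem_cons]
      rw [ih]
      constructor
      · rintro ⟨⟨h1, h2⟩, h3, h4⟩
        refine ⟨⟨h2, h3⟩, ?_⟩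
        rintro r (rfl | hr)
        · exact h1
        · exact h4 r hr
      · rintro ⟨⟨h2, h3⟩, h4⟩
        exact ⟨⟨h4 p (Or.inl rfl), h2⟩, h3, fun r hr => h4 r (Or.inr hr)⟩

theorem chainCache_iff (rs : List (Int × Int)) :
    List.IsChain (fun _ q : Int × Int => -5 ≤ q.1 - 1 ∧ q.1 - 1 ≤ 256) rs ↔
      ∀ w ∈ (rs.map Prod.fst).tail, -5 ≤ w - 1 ∧ w - 1 ≤ 256 := by
  induction rs with
  | nil => simp
  | cons p tl ih =>
    cases tl with
    | nil => simp
    | cons q tl' =>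
      simp only [List.map_cons] at ih
      simp only [List.map_cons, List.isChain_cons_cons, List.tail_cons, List.mem_cons]
      rw [ih]
      constructor
      · rintro ⟨h1, h2⟩ w hw
        rcases hw with rfl | hw
        · exact h1
        · exact h2 w hw
      · intro h
        exact ⟨h q.1 (Or.inl rfl), fun w hw => h w (Or.inr hw)⟩

theorem succ_nodup (vs : List Int) (h : vs.IsChain (fun x y : Int => y = x + 1)) :
    vs.Nodup := by
  have h2 : vs.IsChain (· < ·) := h.imp (by intro a b hh; omega)
  have : vs.Pairwise (· < ·) := h2.pairwise
  exact this.imp (by intro a b hab; omega)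

theorem runsD_mapfst (a : List Int) :
    (runsD a).map Prod.fst = a.destutter Ne := by
  cases a with
  | nil => simp [runsD]
  | cons x xs => rw [runsD, mapfst_runsF, List.destutter_cons' _ _]

theorem count_runsD (a : List Int) (hnd : ((runsD a).map Prod.fst).Nodup) :
    ∀ p ∈ runsD a, p.2 = (a.count p.1 : Int) := by
  cases a with
  | nil => intro p hp; simp [runsD] at hp
  | cons x xs =>
    intro p hp
    have := count_runsF xs x 1 (by simpa [runsD] using hnd) p (by simpa [runsD] using hp)
    by_cases hpx : p.1 = x
    · simp [hpx, List.count_cons] at this ⊢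
      omega
    · simpa [hpx, List.count_cons, Ne.symm hpx] using this

theorem G_iff (a : List Int) :
    List.IsChain (fun p q : Int × Int => p.2 = 2 ∧ q.1 = p.1 + 1) (runsD a) ↔
      (List.IsChain (fun x y : Int => y = x + 1) (a.destutter Ne) ∧
       ∀ v ∈ (a.destutter Ne).dropLast, a.count v = 2) := by
  rw [chainGood_iff, runsD_mapfst]
  constructor
  · rintro ⟨h1, h2⟩
    refine ⟨h1, ?_⟩
    have hnd : ((runsD a).map Prod.fst).Nodup := by
      rw [runsD_mapfst]; exact succ_nodup _ h1
    intro v hv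
    rw [← runsD_mapfst, ← List.map_dropLast] at hv
    obtain ⟨p, hp, rfl⟩ := List.mem_map.mp hv
    have hc := count_runsD a hnd p (List.dropLast_subset _ hp)
    have hp2 := h2 p hp
    omega
  · rintro ⟨h1, h2⟩
    refine ⟨h1, ?_⟩
    have hnd : ((runsD a).map Prod.fst).Nodup := by
      rw [runsD_mapfst]; exact succ_nodup _ h1
    intro p hp
    have hc := count_runsD a hnd p (List.dropLast_subset _ hp)
    have hv : p.1 ∈ (a.destutter Ne).dropLast := by
      rw [← runsD_mapfst, ← List.map_dropLast]
      exact List.mem_map_of_mem hp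
    have := h2 p.1 hv
    omega

theorem C_iff (a : List Int) :
    List.IsChain (fun _ q : Int × Int => -5 ≤ q.1 - 1 ∧ q.1 - 1 ≤ 256) (runsD a) ↔
      ∀ w ∈ (a.destutter Ne).tail, -5 ≤ w - 1 ∧ w - 1 ≤ 256 := by
  rw [chainCache_iff, runsD_mapfst]

theorem cache_shift (vs : List Int) (h : vs.IsChain (fun x y : Int => y = x + 1)) :
    (∀ w ∈ vs.tail, -5 ≤ w - 1 ∧ w - 1 ≤ 256) ↔ (∀ v ∈ vs.dropLast, -5 ≤ v ∧ v ≤ 256) := by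
  induction vs with
  | nil => simp
  | cons x tl ih =>
    cases tl with
    | nil => simp
    | cons y tl' =>
      rw [List.isChain_cons_cons] at h
      have hxy : y - 1 = x := by omega
      have ih' := ih h.2
      simp only [List.tail_cons, List.dropLast_cons₂, List.mem_cons] at ih' ⊢
      constructor
      · intro hh v hv
        rcases hv with rfl | hv
        · have := hh y (Or.inl rfl)
          omega
        · exact ih'.mp (fun w hw => hh w (Or.inr hw)) v hv
      · intro hh w hw
        rcases hw with rfl | hw
        · have := hh x (Or.inl rfl)
          omega
        · exact ih'.mpr (fun v hv => hh v (Or.inr hv)) w hw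

-- ===== VERDICT (by name: the statement is the Claim_ definition above) =====
theorem IsGood5_spec : Claim_unchanged_IsGood5 := by
  intro a _ hnd
  unfold D_IsGood5 at hnd
  rw [aA_runs, altB_runs, chkA_split, chkB_chain]
  by_cases hg : List.IsChain (fun p q : Int × Int => p.2 = 2 ∧ q.1 = p.1 + 1) (runsD a)
  · have hD := (G_iff a).mp hg
    have hcache : ∀ w ∈ (a.destutter Ne).tail, -5 ≤ w - 1 ∧ w - 1 ≤ 256 := by
      rw [cache_shift _ hD.1]
      intro v hv
      by_contra hb
      exact hnd ⟨hD.1, hD.2, v, hv, by omega⟩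
    simp [hg]
    exact ((C_iff a).mpr hcache).imp fun p q hh => ⟨by omega, by omega⟩
  · simp [hg]

theorem IsGood5_changed : Claim_changed_IsGood5 := by
  unfold Claim_changed_IsGood5; decide

theorem IsGood5_tight : Claim_exact_IsGood5 := by
  intro a _ hd
  obtain ⟨h1, h2, h3⟩ := hd
  have hg := (G_iff a).mpr ⟨h1, h2⟩
  rw [aA_runs, altB_runs, chkA_split, chkB_chain]
  simp [hg]
  intro h
  obtain ⟨v, hv, hb⟩ := h3
  have := (cache_shift _ h1).mp ((C_iff a).mp (h.imp fun p q hh => ⟨by omega, by omega⟩)) v hv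
  omega
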